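-- pv_equiv track=rewrite | github.com/amattas/homeassistant-mcp | src/services/homeassistant.py | _group_by_area
-- ===== SOURCE A (Python) =====
-- from typing import Dict, List, Optional, Any, Union
--
-- def _group_by_area(entities: List[Dict]) -> Dict[str, List[Dict]]:
--     """Group entities by area"""
--     grouped = {}
--     for entity in entities:
--         area = entity.get('area') or 'No Area'
--         if area not in grouped:
--             grouped[area] = []
--         grouped[area].append(entity)
--     return grouped
-- ===== SOURCE B (Python) =====
-- def _group_by_area(entities):
--     """Group entities by area via repeated partitioning: take the area key of the
--     first pending entity, emit the whole group for that key in one filtering pass,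
--     drop those entities from the pending list, and repeat until nothing is left."""
--     grouped = {}
--     pending = list(entities)
--     while pending:
--         k = pending[0].get('area') or 'No Area'
--         grouped[k] = [e for e in pending if (e.get('area') or 'No Area') == k]
--         pending = [e for e in pending if (e.get('area') or 'No Area') != k]
--     return grouped
-- ===== Notes on version B (the rewrite author's own statement) =====
-- stated objective: alternative
-- what changed: Replaces A's single scan that grows dict entries one element at a time with a quickselect-style repeated partition: take the first pending entity's area key, emit its whole group in one filtering pass, remove those entities, repeat.
import Mathlib
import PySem

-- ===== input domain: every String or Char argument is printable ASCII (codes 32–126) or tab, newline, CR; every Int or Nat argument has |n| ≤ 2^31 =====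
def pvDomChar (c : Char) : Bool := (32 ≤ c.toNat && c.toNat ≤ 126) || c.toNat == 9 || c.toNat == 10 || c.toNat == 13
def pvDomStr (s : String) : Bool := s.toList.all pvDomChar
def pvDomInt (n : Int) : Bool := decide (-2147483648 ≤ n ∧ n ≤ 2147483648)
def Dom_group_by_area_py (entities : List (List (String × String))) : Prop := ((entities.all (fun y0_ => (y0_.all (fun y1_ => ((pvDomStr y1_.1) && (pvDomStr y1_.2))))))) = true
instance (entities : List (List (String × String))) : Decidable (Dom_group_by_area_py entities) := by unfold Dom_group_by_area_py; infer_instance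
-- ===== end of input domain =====

-- B groups by repeated partitioning (emit the first pending entity's whole group by one
-- filtering pass, drop it from the pending list, repeat) instead of A's single scan that
-- grows one dict entry per element; objective: alternative.


-- ===== PORT A =====
-- area = entity.get('area') or 'No Area'  (get = first match; '' and missing are falsy)
def pyAreaA (entity : List (String × String)) : String :=
  match (PySem.Dict.mk entity).get? "area" with
  | some v => if v == "" then "No Area" else v
  | none => "No Area"

def group_by_area_py (entities : List (List (String × String))) : List (String × List (List (String × String))) :=
  (entities.foldl (fun grouped entity =>
      let area := pyAreaA entity
      let grouped := if grouped.contains area then grouped else grouped.insert area []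
      grouped.modify area [] (· ++ [entity]))
    PySem.Dict.empty).items

-- ===== PORT B =====
-- k = pending[0].get('area') or 'No Area'  ('' and missing are falsy; getD '' collapses both)
def keyB (entity : List (String × String)) : String :=
  let v := (PySem.Dict.mk entity).getD "area" ""
  if v == "" then "No Area" else v

-- the while-loop over the shrinking 'pending' list: one dict assignment per round,
-- each round's key is fresh, so the dict's items are the rounds' pairs in order
def gbaLoop : List (List (String × String)) → List (String × List (List (String × String)))
  | [] => []
  | e :: rest =>
      (keyB e, (e :: rest).filter (fun x => keyB x == keyB e)) ::
      gbaLoop (rest.filter (fun x => keyB x != keyB e))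
termination_by l => l.length
decreasing_by
  simp only [List.length_cons, List.length_unattach]
  exact Nat.lt_succ_of_le (le_trans (List.length_filter_le _ _) (by simp))

def group_by_area_py_alt (entities : List (List (String × String))) : List (String × List (List (String × String))) :=
  gbaLoop entities

-- ===== PRECONDITION & SPEC =====
def Spec_group_by_area_py (entities : List (List (String × String))) (out : List (String × List (List (String × String)))) : Prop := out = group_by_area_py_alt entities
instance (entities : List (List (String × String))) (out : List (String × List (List (String × String)))) : Decidable (Spec_group_by_area_py entities out) := by unfold Spec_group_by_area_py; infer_instance

-- ===== CLAIM (what is proved, stated in full; the proofs are below) =====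
def Claim_equal_group_by_area_py : Prop := ∀ (entities : List (List (String × String))), Dom_group_by_area_py entities → Spec_group_by_area_py entities (group_by_area_py entities)

-- ===== LEMMAS AND PROOFS =====

-- the two ports compute the same area key
theorem keyB_eq_pyAreaA : keyB = pyAreaA := by
  funext e
  unfold keyB pyAreaA
  rw [PySem.Dict.getD_eq_get?_getD]
  cases (PySem.Dict.mk e).get? "area" <;> simp

-- ofList commutes with filter
theorem ofList_filter (p : String → Bool) (l : List String) :
    PySem.Set.ofList (l.filter p) = (PySem.Set.ofList l).filter p := by
  induction l using List.reverseRecOn with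
  | nil => rfl
  | append_singleton l y ih =>
    rw [List.filter_append, PySem.Set.ofList_append_singleton]
    by_cases hp : p y = true
    · simp only [List.filter_cons, hp, List.filter_nil, if_true]
      rw [PySem.Set.ofList_append_singleton, ih]
      by_cases hm : y ∈ PySem.Set.ofList l
      · rw [PySem.Set.add_of_mem hm, PySem.Set.add_of_mem]
        exact List.mem_filter.mpr ⟨hm, hp⟩
      · rw [PySem.Set.add_of_not_mem hm, PySem.Set.add_of_not_mem
          (fun h => hm (List.mem_filter.mp h).1), List.filter_append]
        simp [hp]
    · simp only [Bool.not_eq_true] at hp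
      simp only [List.filter_cons, hp, List.filter_nil, List.append_nil, Bool.false_eq_true,
        if_false, ih]
      by_cases hm : y ∈ PySem.Set.ofList l
      · rw [PySem.Set.add_of_mem hm]
      · rw [PySem.Set.add_of_not_mem hm, List.filter_append]
        simp [hp]

-- first-occurrence dedup, peeled from the left
theorem dedup_cons (a : String) (l : List String) :
    PySem.List.dedup (a :: l) = a :: PySem.List.dedup (l.filter (fun x => x != a)) := by
  simp only [PySem.List.dedup_eq_ofList]
  rw [PySem.Set.ofList_cons, ofList_filter]
  rfl

-- the partition loop computes the canonical "distinct keys, each with its full group" form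
theorem gbaLoop_eq : ∀ (n : Nat) (l : List (List (String × String))), l.length ≤ n →
    gbaLoop l = (PySem.List.dedup (l.map keyB)).map
      (fun k => (k, l.filter (fun e => keyB e == k))) := by
  intro n
  induction n with
  | zero =>
    intro l hl
    rw [List.length_eq_zero_iff.mp (Nat.le_zero.mp hl), gbaLoop]
    rfl
  | succ n ih =>
    intro l hl
    cases l with
    | nil => rw [gbaLoop]; rfl
    | cons e rest =>
      have hm : (rest.filter (fun x => keyB x != keyB e)).length ≤ n :=
        le_trans (List.length_filter_le _ _) (Nat.succ_le_succ_iff.mp hl)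
      rw [gbaLoop, ih _ hm, List.map_cons, dedup_cons, List.map_cons]
      simp only [List.filter_map, Function.comp_def]
      congr 1
      apply List.map_congr_left
      intro k hk
      have hk' : k ∈ (rest.filter (fun x => keyB x != keyB e)).map keyB :=
        (PySem.List.mem_dedup _ _).mp hk
      obtain ⟨x, hx, hxk⟩ := List.mem_map.mp hk'
      have hne : k ≠ keyB e := by
        have := (List.mem_filter.mp hx).2
        rw [← hxk]; exact bne_iff_ne.mp this
      have hhead : (keyB e == k) = false := by
        simp [Ne.symm hne]
      rw [List.filter_cons]
      simp only [hhead, Bool.false_eq_true, if_false, List.filter_filter]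
      congr 1
      apply List.filter_congr
      intro y _
      by_cases hy : keyB y = k
      · simp [hy, bne_iff_ne, hne]
      · simp [hy]

-- A's conditional "insert [] then append" step is one modify
theorem stepA_eq_modify (d : PySem.Dict String (List (List (String × String)))) (e : List (String × String)) :
    (if d.contains (pyAreaA e) then d else d.insert (pyAreaA e) []).modify (pyAreaA e) [] (· ++ [e])
      = d.modify (pyAreaA e) [] (· ++ [e]) := by
  by_cases h : d.contains (pyAreaA e)
  · simp [h]
  · simp only [Bool.not_eq_true] at h
    simp [h, PySem.Dict.modify, PySem.Dict.getD_insert_self, PySem.Dict.insert_insert_self,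
      PySem.Dict.getD_of_not_contains d [] h]

theorem foldA_eq (entities : List (List (String × String))) :
    (entities.foldl (fun grouped entity =>
        let area := pyAreaA entity
        let grouped := if grouped.contains area then grouped else grouped.insert area []
        grouped.modify area [] (· ++ [entity]))
      PySem.Dict.empty)
    = (entities.map (fun e => (pyAreaA e, e))).foldl
        (fun d p => d.modify p.1 [] (· ++ [p.2])) PySem.Dict.empty := by
  rw [List.foldl_map]
  exact PySem.List.foldl_congr_mem _ _ _ _ (fun d e _ => stepA_eq_modify d e)

-- ===== VERDICT =====
theorem group_by_area_py_spec : Claim_equal_group_by_area_py := by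
  intro entities _
  show group_by_area_py entities = group_by_area_py_alt entities
  unfold group_by_area_py group_by_area_py_alt
  rw [foldA_eq, gbaLoop_eq entities.length entities le_rfl, keyB_eq_pyAreaA]
  set pairs := entities.map (fun e => (pyAreaA e, e)) with hpairs
  set D := pairs.foldl (fun d p => d.modify p.1 [] (· ++ [p.2])) PySem.Dict.empty with hD
  have hkeys : D.keys = PySem.List.dedup (entities.map pyAreaA) := by
    rw [hD, PySem.Dict.keys_foldl_modify_key (key := Prod.fst)]
    simp [hpairs, List.map_map, PySem.Set.update_nil_left, Function.comp_def]
  have hnodup : D.keys.Nodup := by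
    rw [hkeys]; exact PySem.List.nodup_dedup _
  have hgetD : ∀ k, D.getD k [] = entities.filter (fun e => pyAreaA e == k) := by
    intro k
    rw [hD, PySem.Dict.getD_foldl_modify_append]
    simp [hpairs, List.filter_map, List.map_map, Function.comp_def]
  rw [PySem.Dict.items_eq_map_keys D hnodup [], hkeys]
  exact List.map_congr_left (fun k _ => by rw [hgetD k])
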